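-- pv_equiv track=rewrite | github.com/GarrickBrueningAbbVie/confluence_rag | src/prompts/prompt_splitter.py | _clean_question
-- ===== SOURCE A (Python) =====
-- def _clean_question(question: str) -> str:
--     """Clean up the core question.
--
--     Args:
--         question: Raw question text
--
--     Returns:
--         Cleaned question
--     """
--     # Remove trailing punctuation except ?
--     question = question.strip()
--
--     # Remove common instruction prefixes that might remain
--     prefixes_to_remove = [
--         "please ",
--         "can you ",
--         "could you ",
--         "would you ",
--         "i need you to ",
--         "i want you to ",
--     ]
--
--     question_lower = question.lower()
--     for prefix in prefixes_to_remove: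
--         if question_lower.startswith(prefix):
--             question = question[len(prefix):]
--             break
--
--     return question.strip()
-- ===== SOURCE B (Python) =====
-- def _build(prefixes):
--     """Compile the prefix list into a character trie (a little DFA):
--     integer states, a transition table keyed by (state, char), and the
--     set of accepting states (one per prefix end)."""
--     trans = {}
--     accept = set()
--     count = 1
--     for p in prefixes:
--         state = 0
--         for ch in p:
--             nxt = trans.get((state, ch))
--             if nxt is None:
--                 nxt = count
--                 count += 1
--                 trans[(state, ch)] = nxt
--             state = nxt
--         accept.add(state)
--     return trans, accept
--
--
-- _TRANS, _ACCEPT = _build([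
--     "please ",
--     "can you ",
--     "could you ",
--     "would you ",
--     "i need you to ",
--     "i want you to ",
-- ])
--
--
-- def _clean_question(question: str) -> str:
--     """Clean up the core question.
--
--     Args:
--         question: Raw question text
--
--     Returns:
--         Cleaned question
--     """
--     q = question.strip()
--     # Single left-to-right scan of the question through the trie: stop at
--     # the first char with no transition, cut at the first accepting state.
--     state = 0
--     for i, ch in enumerate(q):
--         nxt = _TRANS.get((state, ch.lower()))
--         if nxt is None:
--             break
--         state = nxt
--         if state in _ACCEPT:
--             return q[i + 1:].strip()
--     return q
-- ===== Notes on version B (the rewrite author's own statement) =====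
-- stated objective: alternative
-- what changed: Replaces A's loop of startswith tests against a list of lowered prefixes by compiling the six prefixes once into a character trie (a small DFA: integer states, a (state,char) transition table, accepting states) and scanning the stripped question through it in a single pass, cutting at the first accepting state.
import Mathlib
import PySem

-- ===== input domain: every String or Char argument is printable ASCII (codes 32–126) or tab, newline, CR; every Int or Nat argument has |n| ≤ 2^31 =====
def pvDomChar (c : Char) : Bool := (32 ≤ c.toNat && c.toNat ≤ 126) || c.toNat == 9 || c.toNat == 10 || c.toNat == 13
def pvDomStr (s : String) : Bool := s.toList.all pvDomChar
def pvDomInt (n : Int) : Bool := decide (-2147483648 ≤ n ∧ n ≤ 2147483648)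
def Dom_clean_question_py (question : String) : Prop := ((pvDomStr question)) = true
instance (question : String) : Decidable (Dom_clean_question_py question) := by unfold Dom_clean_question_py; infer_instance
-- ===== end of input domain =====

-- B replaces A's loop of startswith tests over the prefix list by a compiled character
-- trie (a small DFA) scanned once over the question (alternative algorithm, same cost).

-- ===== PORT A =====
def pvPrefixes : List String :=
  ["please ", "can you ", "could you ", "would you ", "i need you to ", "i want you to "]

-- the for-loop with break: the first matching prefix is removed, then the loop stops
def pvLoopA (qlow q : String) : List String → String
  | [] => q
  | p :: rest =>
      if PySem.Str.startswith qlow p then PySem.Str.slice q (some (PySem.Str.len p)) none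
      else pvLoopA qlow q rest

def clean_question_py (question : String) : String :=
  let q := PySem.Str.strip question
  let qlow := PySem.Str.lower q
  PySem.Str.strip (pvLoopA qlow q pvPrefixes)

-- ===== PORT B =====
-- _build's inner loop body: look the (state, char) edge up, allocating a fresh state if absent
def pvBuildChar (st : PySem.Dict (Int × Char) Int × Int × Int) (ch : Char) :
    PySem.Dict (Int × Char) Int × Int × Int :=
  let (tr, count, state) := st
  match PySem.Dict.get? tr (state, ch) with
  | some nxt => (tr, count, nxt)
  | none => (PySem.Dict.insert tr (state, ch) count, count + 1, count)

-- _build: fold the two Python for-loops, returning (trans, accept)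
def pvBuild (prefixes : List String) : PySem.Dict (Int × Char) Int × PySem.Set Int :=
  let res := prefixes.foldl
    (fun (acc : PySem.Dict (Int × Char) Int × PySem.Set Int × Int) p =>
      let (tr, acc', count) := acc
      let (tr', count', state) := p.toList.foldl pvBuildChar (tr, count, (0 : Int))
      (tr', PySem.Set.add acc' state, count'))
    (PySem.Dict.empty, PySem.Set.empty, (1 : Int))
  (res.1, res.2.1)

def pvTrans : PySem.Dict (Int × Char) Int := (pvBuild pvPrefixes).1
def pvAccept : PySem.Set Int := (pvBuild pvPrefixes).2

-- the scan loop: for i, ch in enumerate(q) with break / early return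
def pvWalk (q : String) : List Char → Int → Int → String
  | [], _, _ => q
  | c :: cs, state, i =>
    match PySem.Dict.get? pvTrans (state, PySem.Chars.lowerChar c) with
    | none => q
    | some nxt =>
      if PySem.Set.contains pvAccept nxt then
        PySem.Str.strip (PySem.Str.slice q (some (i + 1)) none)
      else pvWalk q cs nxt (i + 1)

def clean_question_py_alt (question : String) : String :=
  let q := PySem.Str.strip question
  pvWalk q q.toList 0 0

-- ===== PRECONDITION & SPEC =====
def Spec_clean_question_py (question : String) (out : String) : Prop := out = clean_question_py_alt question
instance (question : String) (out : String) : Decidable (Spec_clean_question_py question out) := by unfold Spec_clean_question_py; infer_instance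

-- ===== CLAIM (what is proved, stated in full; the proofs are below) =====
def Claim_equal_clean_question_py : Prop := ∀ (question : String), Dom_clean_question_py question → Spec_clean_question_py question (clean_question_py question)

-- ===== LEMMAS AND PROOFS =====

-- the trie _build produces, as a literal table, and the path word spelling each state
def pvTransLit : List ((Int × Char) × Int) :=
  [((0, 'p'), 1),
   ((1, 'l'), 2),
   ((2, 'e'), 3),
   ((3, 'a'), 4),
   ((4, 's'), 5),
   ((5, 'e'), 6),
   ((6, ' '), 7),
   ((0, 'c'), 8),
   ((8, 'a'), 9),
   ((9, 'n'), 10),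
   ((10, ' '), 11),
   ((11, 'y'), 12),
   ((12, 'o'), 13),
   ((13, 'u'), 14),
   ((14, ' '), 15),
   ((8, 'o'), 16),
   ((16, 'u'), 17),
   ((17, 'l'), 18),
   ((18, 'd'), 19),
   ((19, ' '), 20),
   ((20, 'y'), 21),
   ((21, 'o'), 22),
   ((22, 'u'), 23),
   ((23, ' '), 24),
   ((0, 'w'), 25),
   ((25, 'o'), 26),
   ((26, 'u'), 27),
   ((27, 'l'), 28),
   ((28, 'd'), 29),
   ((29, ' '), 30),
   ((30, 'y'), 31),
   ((31, 'o'), 32),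
   ((32, 'u'), 33),
   ((33, ' '), 34),
   ((0, 'i'), 35),
   ((35, ' '), 36),
   ((36, 'n'), 37),
   ((37, 'e'), 38),
   ((38, 'e'), 39),
   ((39, 'd'), 40),
   ((40, ' '), 41),
   ((41, 'y'), 42),
   ((42, 'o'), 43),
   ((43, 'u'), 44),
   ((44, ' '), 45),
   ((45, 't'), 46),
   ((46, 'o'), 47),
   ((47, ' '), 48),
   ((36, 'w'), 49),
   ((49, 'a'), 50),
   ((50, 'n'), 51),
   ((51, 't'), 52),
   ((52, ' '), 53),
   ((53, 'y'), 54),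
   ((54, 'o'), 55),
   ((55, 'u'), 56),
   ((56, ' '), 57),
   ((57, 't'), 58),
   ((58, 'o'), 59),
   ((59, ' '), 60)]


def pvStateStr : Int → List Char
  | 0 => []
  | 1 => ['p']
  | 2 => ['p', 'l']
  | 3 => ['p', 'l', 'e']
  | 4 => ['p', 'l', 'e', 'a']
  | 5 => ['p', 'l', 'e', 'a', 's']
  | 6 => ['p', 'l', 'e', 'a', 's', 'e']
  | 7 => ['p', 'l', 'e', 'a', 's', 'e', ' ']
  | 8 => ['c']
  | 9 => ['c', 'a']
  | 10 => ['c', 'a', 'n']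
  | 11 => ['c', 'a', 'n', ' ']
  | 12 => ['c', 'a', 'n', ' ', 'y']
  | 13 => ['c', 'a', 'n', ' ', 'y', 'o']
  | 14 => ['c', 'a', 'n', ' ', 'y', 'o', 'u']
  | 15 => ['c', 'a', 'n', ' ', 'y', 'o', 'u', ' ']
  | 16 => ['c', 'o']
  | 17 => ['c', 'o', 'u']
  | 18 => ['c', 'o', 'u', 'l']
  | 19 => ['c', 'o', 'u', 'l', 'd']
  | 20 => ['c', 'o', 'u', 'l', 'd', ' ']
  | 21 => ['c', 'o', 'u', 'l', 'd', ' ', 'y']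
  | 22 => ['c', 'o', 'u', 'l', 'd', ' ', 'y', 'o']
  | 23 => ['c', 'o', 'u', 'l', 'd', ' ', 'y', 'o', 'u']
  | 24 => ['c', 'o', 'u', 'l', 'd', ' ', 'y', 'o', 'u', ' ']
  | 25 => ['w']
  | 26 => ['w', 'o']
  | 27 => ['w', 'o', 'u']
  | 28 => ['w', 'o', 'u', 'l']
  | 29 => ['w', 'o', 'u', 'l', 'd']
  | 30 => ['w', 'o', 'u', 'l', 'd', ' ']
  | 31 => ['w', 'o', 'u', 'l', 'd', ' ', 'y']
  | 32 => ['w', 'o', 'u', 'l', 'd', ' ', 'y', 'o']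
  | 33 => ['w', 'o', 'u', 'l', 'd', ' ', 'y', 'o', 'u']
  | 34 => ['w', 'o', 'u', 'l', 'd', ' ', 'y', 'o', 'u', ' ']
  | 35 => ['i']
  | 36 => ['i', ' ']
  | 37 => ['i', ' ', 'n']
  | 38 => ['i', ' ', 'n', 'e']
  | 39 => ['i', ' ', 'n', 'e', 'e']
  | 40 => ['i', ' ', 'n', 'e', 'e', 'd']
  | 41 => ['i', ' ', 'n', 'e', 'e', 'd', ' ']
  | 42 => ['i', ' ', 'n', 'e', 'e', 'd', ' ', 'y']
  | 43 => ['i', ' ', 'n', 'e', 'e', 'd', ' ', 'y', 'o']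
  | 44 => ['i', ' ', 'n', 'e', 'e', 'd', ' ', 'y', 'o', 'u']
  | 45 => ['i', ' ', 'n', 'e', 'e', 'd', ' ', 'y', 'o', 'u', ' ']
  | 46 => ['i', ' ', 'n', 'e', 'e', 'd', ' ', 'y', 'o', 'u', ' ', 't']
  | 47 => ['i', ' ', 'n', 'e', 'e', 'd', ' ', 'y', 'o', 'u', ' ', 't', 'o']
  | 48 => ['i', ' ', 'n', 'e', 'e', 'd', ' ', 'y', 'o', 'u', ' ', 't', 'o', ' ']
  | 49 => ['i', ' ', 'w']
  | 50 => ['i', ' ', 'w', 'a']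
  | 51 => ['i', ' ', 'w', 'a', 'n']
  | 52 => ['i', ' ', 'w', 'a', 'n', 't']
  | 53 => ['i', ' ', 'w', 'a', 'n', 't', ' ']
  | 54 => ['i', ' ', 'w', 'a', 'n', 't', ' ', 'y']
  | 55 => ['i', ' ', 'w', 'a', 'n', 't', ' ', 'y', 'o']
  | 56 => ['i', ' ', 'w', 'a', 'n', 't', ' ', 'y', 'o', 'u']
  | 57 => ['i', ' ', 'w', 'a', 'n', 't', ' ', 'y', 'o', 'u', ' ']
  | 58 => ['i', ' ', 'w', 'a', 'n', 't', ' ', 'y', 'o', 'u', ' ', 't']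
  | 59 => ['i', ' ', 'w', 'a', 'n', 't', ' ', 'y', 'o', 'u', ' ', 't', 'o']
  | 60 => ['i', ' ', 'w', 'a', 'n', 't', ' ', 'y', 'o', 'u', ' ', 't', 'o', ' ']
  | _ => []

theorem pvTrans_eq : pvTrans = PySem.Dict.mk pvTransLit := by decide

theorem pvAccept_eq : pvAccept = [7, 15, 24, 34, 48, 60] := by decide

theorem pv_get?_mem {κ ν : Type} [BEq κ] [LawfulBEq κ] (L : List (κ × ν)) (k : κ) (v : ν)
    (h : (PySem.Dict.mk L).get? k = some v) : (k, v) ∈ L := by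
  induction L with
  | nil => simp [PySem.Dict.get?] at h
  | cons p rest ih =>
    obtain ⟨k', v'⟩ := p
    rw [PySem.Dict.get?_mk_cons] at h
    by_cases hk : (k' == k) = true
    · rw [if_pos hk] at h
      injection h with hv
      have hk' := beq_iff_eq.mp hk
      subst hk'; subst hv
      exact List.mem_cons_self
    · rw [if_neg hk] at h
      exact List.mem_cons_of_mem _ (ih h)

-- the trie invariant: every edge (s, c) → t extends the path word by c, and every
-- accepting state spells one of the six prefixes
set_option maxHeartbeats 1000000 in
theorem pvH1 (s : Int) (c : Char) (t : Int) (h : PySem.Dict.get? pvTrans (s, c) = some t) :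
    pvStateStr t = pvStateStr s ++ [c] ∧
      (PySem.Set.contains pvAccept t = true → pvStateStr t ∈ pvPrefixes.map String.toList) := by
  rw [pvTrans_eq] at h
  have hm := pv_get?_mem pvTransLit (s, c) t h
  have hp : ∀ e ∈ pvTransLit, pvStateStr e.2 = pvStateStr e.1.1 ++ [e.1.2] ∧
      (e.2 ∈ ([7, 15, 24, 34, 48, 60] : List Int) →
        pvStateStr e.2 ∈ pvPrefixes.map String.toList) := by decide
  obtain ⟨h1, h2⟩ := hp ((s, c), t) hm
  refine ⟨h1, fun hacc => h2 ?_⟩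
  rw [pvAccept_eq] at hacc
  simpa using hacc

theorem pv_toList_inj (a b : String) (h : a.toList = b.toList) : a = b := by
  have h1 := congrArg String.ofList h
  rwa [String.ofList_toList, String.ofList_toList] at h1

-- scanning from a live state: if no prefix occurs at the front of the lowered question,
-- the walk never reaches an accepting state and falls back to q
theorem pvWalk_no_match (q : String)
    (hnm : ∀ p ∈ pvPrefixes, ¬ (p.toList <+: q.toList.map PySem.Chars.lowerChar)) :
    ∀ (cs : List Char) (s : Int) (j : Int) (i : Nat), cs = q.toList.drop i →
      pvStateStr s = (q.toList.map PySem.Chars.lowerChar).take i →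
      i = (pvStateStr s).length →
      pvWalk q cs s j = q := by
  intro cs
  induction cs with
  | nil => intro s j i _ _ _; rfl
  | cons c cs' ih =>
    intro s j i hdrop hstr hlen
    have hi : i < q.toList.length := by
      by_contra hge
      rw [Nat.not_lt] at hge
      rw [List.drop_eq_nil_of_le hge] at hdrop
      exact List.cons_ne_nil _ _ hdrop
    have hsplit : q.toList.drop i = q.toList[i] :: q.toList.drop (i + 1) :=
      (List.getElem_cons_drop hi).symm
    rw [hsplit] at hdrop
    injection hdrop with hc hcs
    simp only [pvWalk]
    cases hg : PySem.Dict.get? pvTrans (s, PySem.Chars.lowerChar c) with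
    | none => rfl
    | some nxt =>
      dsimp only
      obtain ⟨h1, h2⟩ := pvH1 _ _ _ hg
      have hilow : i < (q.toList.map PySem.Chars.lowerChar).length := by
        simpa [List.length_map] using hi
      have hlc : PySem.Chars.lowerChar c = (q.toList.map PySem.Chars.lowerChar)[i] := by
        rw [hc]; simp
      have hstr' : pvStateStr nxt = (q.toList.map PySem.Chars.lowerChar).take (i + 1) := by
        rw [h1, hstr, hlc, List.take_concat_get']
      cases hacc : PySem.Set.contains pvAccept nxt with
      | true =>
        exfalso
        have hmem := h2 hacc
        obtain ⟨p, hp, hpe⟩ := List.mem_map.mp hmem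
        exact hnm p hp (hpe ▸ hstr' ▸ List.take_prefix _ _)
      | false =>
        rw [if_neg (by simp)]
        refine ih nxt (j + 1) (i + 1) hcs hstr' ?_
        rw [hstr', List.length_take, Nat.min_eq_left (by omega)]

-- the Bool "this lowered word is exactly one full trie path ending in an accepting state"
def pvPathAcc (s : Int) : List Char → Bool
  | [] => false
  | c :: w =>
    match PySem.Dict.get? pvTrans (s, c) with
    | none => false
    | some nxt => if PySem.Set.contains pvAccept nxt then w.isEmpty else pvPathAcc nxt w

theorem pvWalk_accept (q : String) :
    ∀ (t rest : List Char) (s : Int) (j : Int),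
      pvPathAcc s (t.map PySem.Chars.lowerChar) = true →
      pvWalk q (t ++ rest) s j =
        PySem.Str.strip (PySem.Str.slice q (some (j + (t.length : Int))) none) := by
  intro t
  induction t with
  | nil => intro rest s j h; simp [pvPathAcc] at h
  | cons c t' ih =>
    intro rest s j h
    simp only [List.map_cons, pvPathAcc] at h
    rw [List.cons_append]
    simp only [pvWalk]
    cases hg : PySem.Dict.get? pvTrans (s, PySem.Chars.lowerChar c) with
    | none => rw [hg] at h; simp at h
    | some nxt =>
      rw [hg] at h
      dsimp only at h ⊢
      cases hacc : PySem.Set.contains pvAccept nxt with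
      | true =>
        rw [hacc] at h
        simp only [if_true] at h
        have ht' : t' = [] := by simpa using h
        subst ht'
        rw [if_pos rfl]
        norm_num
      | false =>
        rw [hacc] at h
        simp only [Bool.false_eq_true, if_false] at h
        rw [if_neg (by simp), ih rest nxt (j + 1) h]
        have harg : j + 1 + (t'.length : Int) = j + (((c :: t').length : Nat) : Int) := by
          push_cast [List.length_cons]; ring
        rw [harg]

theorem pv_chars_strip_idem (l : List Char) :
    PySem.Chars.strip (PySem.Chars.strip l) = PySem.Chars.strip l := by
  have hdef : ∀ x : List Char, PySem.Chars.strip x =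
      ((x.dropWhile PySem.Chars.isspace).reverse.dropWhile PySem.Chars.isspace).reverse :=
    fun _ => rfl
  rw [hdef, hdef]
  set p := PySem.Chars.isspace
  set t := l.dropWhile p with ht
  set u := t.reverse.dropWhile p with hu
  have step1 : u.reverse.dropWhile p = u.reverse := by
    rw [List.dropWhile_eq_self_iff]
    intro hl
    have hsuf : u <:+ t.reverse := hu ▸ List.dropWhile_suffix p
    have hpref : u.reverse <+: t := by
      have := hsuf.reverse
      simpa using this
    have hget := hpref.getElem (i := 0) hl
    rw [hget]
    have hne : t ≠ [] := by
      intro h0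
      rw [h0] at hpref
      simp only [List.prefix_nil] at hpref
      rw [hpref] at hl
      simp at hl
    have hhead : p (t.head hne) = false := List.head_dropWhile_not p hne
    rw [List.getElem_zero_eq_head]
    simp [hhead]
  rw [step1, List.reverse_reverse, hu, List.dropWhile_idempotent]

theorem pv_strip_idem (s : String) :
    PySem.Str.strip (PySem.Str.strip s) = PySem.Str.strip s := by
  apply pv_toList_inj
  simp only [PySem.Str.toList_strip]
  exact pv_chars_strip_idem s.toList

-- B's walk when prefix p occurs (lowered) at the front of q: cut |p| characters
theorem pvAlt_of_prefix (q : String) (p : String)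
    (hacc : pvPathAcc 0 p.toList = true)
    (hpre : p.toList <+: q.toList.map PySem.Chars.lowerChar) :
    pvWalk q q.toList 0 0 =
      PySem.Str.strip (PySem.Str.slice q (some ((p.toList.length : Int))) none) := by
  have hn : p.toList.length ≤ q.toList.length := by
    have := hpre.length_le
    simpa [List.length_map] using this
  have htake : (q.toList.take p.toList.length).map PySem.Chars.lowerChar = p.toList := by
    rw [List.map_take]
    exact (List.prefix_iff_eq_take.mp hpre).symm
  have hlen : (q.toList.take p.toList.length).length = p.toList.length := by
    rw [List.length_take, Nat.min_eq_left hn]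
  calc pvWalk q q.toList 0 0
      = pvWalk q (q.toList.take p.toList.length ++ q.toList.drop p.toList.length) 0 0 := by
        rw [List.take_append_drop]
    _ = PySem.Str.strip
          (PySem.Str.slice q (some (0 + ((q.toList.take p.toList.length).length : Int))) none) :=
        pvWalk_accept q _ _ 0 0 (by rw [htake]; exact hacc)
    _ = PySem.Str.strip (PySem.Str.slice q (some ((p.toList.length : Int))) none) := by
        rw [hlen, zero_add]

-- ===== VERDICT (by name: the statement is the Claim_ definition above) =====
theorem clean_question_py_spec : Claim_equal_clean_question_py := by
  intro question _
  show clean_question_py question = clean_question_py_alt question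
  unfold clean_question_py clean_question_py_alt
  simp only [pvPrefixes, pvLoopA]
  set q := PySem.Str.strip question with hq
  have hsw : ∀ p : String, PySem.Str.startswith (PySem.Str.lower q) p = true ↔
      p.toList <+: q.toList.map PySem.Chars.lowerChar := by
    intro p
    simp only [PySem.Str.startswith_eq, PySem.Str.toList_lower]
    rw [show PySem.Chars.lower q.toList = q.toList.map PySem.Chars.lowerChar from rfl]
    exact PySem.Chars.startswith_iff _ _
  by_cases h1 : ("please " : String).toList <+: q.toList.map PySem.Chars.lowerChar
  · rw [if_pos ((hsw _).mpr h1), pvAlt_of_prefix q "please " (by decide) h1]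
    have hl : ((("please " : String).toList.length : Nat) : Int) = PySem.Str.len "please " := by decide
    rw [← hl]
  rw [if_neg (fun hc => h1 ((hsw _).mp hc))]
  by_cases h2 : ("can you " : String).toList <+: q.toList.map PySem.Chars.lowerChar
  · rw [if_pos ((hsw _).mpr h2), pvAlt_of_prefix q "can you " (by decide) h2]
    have hl : ((("can you " : String).toList.length : Nat) : Int) = PySem.Str.len "can you " := by decide
    rw [← hl]
  rw [if_neg (fun hc => h2 ((hsw _).mp hc))]
  by_cases h3 : ("could you " : String).toList <+: q.toList.map PySem.Chars.lowerChar
  · rw [if_pos ((hsw _).mpr h3), pvAlt_of_prefix q "could you " (by decide) h3]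
    have hl : ((("could you " : String).toList.length : Nat) : Int) = PySem.Str.len "could you " := by decide
    rw [← hl]
  rw [if_neg (fun hc => h3 ((hsw _).mp hc))]
  by_cases h4 : ("would you " : String).toList <+: q.toList.map PySem.Chars.lowerChar
  · rw [if_pos ((hsw _).mpr h4), pvAlt_of_prefix q "would you " (by decide) h4]
    have hl : ((("would you " : String).toList.length : Nat) : Int) = PySem.Str.len "would you " := by decide
    rw [← hl]
  rw [if_neg (fun hc => h4 ((hsw _).mp hc))]
  by_cases h5 : ("i need you to " : String).toList <+: q.toList.map PySem.Chars.lowerChar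
  · rw [if_pos ((hsw _).mpr h5), pvAlt_of_prefix q "i need you to " (by decide) h5]
    have hl : ((("i need you to " : String).toList.length : Nat) : Int) = PySem.Str.len "i need you to " := by decide
    rw [← hl]
  rw [if_neg (fun hc => h5 ((hsw _).mp hc))]
  by_cases h6 : ("i want you to " : String).toList <+: q.toList.map PySem.Chars.lowerChar
  · rw [if_pos ((hsw _).mpr h6), pvAlt_of_prefix q "i want you to " (by decide) h6]
    have hl : ((("i want you to " : String).toList.length : Nat) : Int) = PySem.Str.len "i want you to " := by decide
    rw [← hl]
  rw [if_neg (fun hc => h6 ((hsw _).mp hc))]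
  have hnm : ∀ p ∈ pvPrefixes, ¬ (p.toList <+: q.toList.map PySem.Chars.lowerChar) := by
    intro p hp
    simp only [pvPrefixes, List.mem_cons, List.not_mem_nil, or_false] at hp
    rcases hp with rfl | rfl | rfl | rfl | rfl | rfl
    exacts [h1, h2, h3, h4, h5, h6]
  rw [pvWalk_no_match q hnm q.toList 0 0 0 (List.drop_zero (l := q.toList)).symm rfl rfl]
  exact pv_strip_idem question
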